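-- pv_equiv track=rewrite | github.com/touge13/Algorithms | TrainingAlgorithms6.0/2 (полный балл)/D.py | min_days_to_complete_tasks
-- ===== SOURCE A (Python) =====
-- def min_days_to_complete_tasks(n, k, tasks):
--     tasks.sort()
--
--     l = r = 0
--     days = 0
--
--     while l < n:
--         while r < n and tasks[r] - tasks[l] <= k:
--             r += 1
--         days = max(days, r - l)
--         l += 1
--     return days
-- ===== SOURCE B (Python) =====
-- def min_days_to_complete_tasks(n, k, tasks):
--     tasks.sort()
--     days = 0
--     for r in range(n):
--         # first index lo in [0, r] with tasks[lo] >= tasks[r] - k (binary search)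
--         target = tasks[r] - k
--         lo, hi = 0, r + 1
--         while lo < hi:
--             mid = (lo + hi) // 2
--             if tasks[mid] < target:
--                 lo = mid + 1
--             else:
--                 hi = mid
--         days = max(days, r - lo + 1)
--     return days
-- ===== Notes on version B (the rewrite author's own statement) =====
-- stated objective: alternative
-- what changed: replaces the monotone two-pointer sliding window with, for each right endpoint r, a hand-written binary search (bisect_left) into the sorted prefix tasks[0..r] for the leftmost element >= tasks[r]-k
import Mathlib
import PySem

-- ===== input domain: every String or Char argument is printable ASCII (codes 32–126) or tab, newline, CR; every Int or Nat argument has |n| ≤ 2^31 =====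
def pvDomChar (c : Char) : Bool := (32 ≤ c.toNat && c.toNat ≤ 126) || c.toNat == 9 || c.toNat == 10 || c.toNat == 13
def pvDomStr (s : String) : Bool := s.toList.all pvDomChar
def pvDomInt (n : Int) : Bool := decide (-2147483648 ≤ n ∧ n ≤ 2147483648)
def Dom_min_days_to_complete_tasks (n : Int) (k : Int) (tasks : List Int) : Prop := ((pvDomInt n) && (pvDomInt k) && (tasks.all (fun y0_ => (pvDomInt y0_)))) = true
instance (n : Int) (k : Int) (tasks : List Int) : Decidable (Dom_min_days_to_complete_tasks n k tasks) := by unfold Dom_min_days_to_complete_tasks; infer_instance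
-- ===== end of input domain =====

-- B replaces A's two-pointer scan by a per-endpoint binary search; equivalence is about the
-- RETURN value only (both A and B sort `tasks` in place, the same mutation).

-- ===== PORT A =====
-- inner `while r < n and tasks[r] - tasks[l] <= k: r += 1`
def pvAInner (n k : Int) (t : List Int) (l r : Int) : Int :=
  if _h : r < n ∧ PySem.List.pyGetD t r 0 - PySem.List.pyGetD t l 0 ≤ k then
    pvAInner n k t l (r + 1)
  else r
termination_by (n - r).toNat
decreasing_by omega

-- outer `while l < n: …`
def pvAOuter (n k : Int) (t : List Int) (l r days : Int) : Int :=
  if _h : l < n then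
    pvAOuter n k t (l + 1) (pvAInner n k t l r) (max days (pvAInner n k t l r - l))
  else days
termination_by (n - l).toNat
decreasing_by omega

def min_days_to_complete_tasks (n : Int) (k : Int) (tasks : List Int) : Int :=
  pvAOuter n k (PySem.List.sorted tasks id) 0 0 0

-- ===== PORT B =====
-- midpoint bounds, needed by pvBisect's termination proof
theorem pvMidBounds (lo hi : Int) (h : lo < hi) :
    lo ≤ PySem.Int.floordiv (lo + hi) 2 ∧ PySem.Int.floordiv (lo + hi) 2 < hi := by
  constructor
  · rw [PySem.Int.le_floordiv_iff_mul_le (by omega)]; omega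
  · rw [PySem.Int.floordiv_lt_iff_lt_mul (by omega)]; omega

-- hand-written bisect_left: `while lo < hi: mid = (lo+hi)//2; …`
def pvBisect (t : List Int) (target lo hi : Int) : Int :=
  if _h : lo < hi then
    if PySem.List.pyGetD t (PySem.Int.floordiv (lo + hi) 2) 0 < target then
      pvBisect t target (PySem.Int.floordiv (lo + hi) 2 + 1) hi
    else
      pvBisect t target lo (PySem.Int.floordiv (lo + hi) 2)
  else lo
termination_by (hi - lo).toNat
decreasing_by
  · have := pvMidBounds lo hi _h; omega
  · have := pvMidBounds lo hi _h; omega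

def min_days_to_complete_tasks_alt (n : Int) (k : Int) (tasks : List Int) : Int :=
  let t := PySem.List.sorted tasks id
  (PySem.List.pyRange 0 n 1).foldl (fun days r =>
    max days (r - pvBisect t (PySem.List.pyGetD t r 0 - k) 0 (r + 1) + 1)) 0

-- ===== PRECONDITION & SPEC =====
-- Pre_: A indexes tasks[l], tasks[r] for l, r up to n; whenever n > len(tasks) it raises IndexError.
def Pre_min_days_to_complete_tasks (n : Int) (k : Int) (tasks : List Int) : Prop :=
  n ≤ (tasks.length : Int)
instance (n : Int) (k : Int) (tasks : List Int) : Decidable (Pre_min_days_to_complete_tasks n k tasks) := by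
  unfold Pre_min_days_to_complete_tasks; infer_instance

def pvWitness_min_days_to_complete_tasks : Int × Int × List Int := (3, 2, [1, 4, 2])

def Spec_min_days_to_complete_tasks (n : Int) (k : Int) (tasks : List Int) (out : Int) : Prop := out = min_days_to_complete_tasks_alt n k tasks
instance (n : Int) (k : Int) (tasks : List Int) (out : Int) : Decidable (Spec_min_days_to_complete_tasks n k tasks out) := by unfold Spec_min_days_to_complete_tasks; infer_instance

-- ===== CLAIM (what is proved, stated in full; the proofs are below) =====
def Claim_equal_min_days_to_complete_tasks : Prop := ∀ (n : Int) (k : Int) (tasks : List Int), Dom_min_days_to_complete_tasks n k tasks → Pre_min_days_to_complete_tasks n k tasks → Spec_min_days_to_complete_tasks n k tasks (min_days_to_complete_tasks n k tasks)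

-- ===== LEMMAS AND PROOFS =====

-- a valid window [l, r] of the sorted list, within the first n elements
def pvWin (n k : Int) (t : List Int) (l r : Int) : Prop :=
  0 ≤ l ∧ l ≤ r ∧ r < n ∧
  PySem.List.pyGetD t r 0 - PySem.List.pyGetD t l 0 ≤ k

-- characterisation of the answer: nonnegative, an upper bound on all window
-- sizes, and attained (or 0); any two values satisfying it are equal
def pvP (n k : Int) (t : List Int) (res : Int) : Prop :=
  0 ≤ res ∧ (∀ l r, pvWin n k t l r → r - l + 1 ≤ res) ∧
  (res = 0 ∨ ∃ l r, pvWin n k t l r ∧ res = r - l + 1)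

theorem pvP_unique {n k : Int} {t : List Int} {x y : Int}
    (hx : pvP n k t x) (hy : pvP n k t y) : x = y := by
  obtain ⟨hx0, hxub, hxa⟩ := hx
  obtain ⟨hy0, hyub, hya⟩ := hy
  have h1 : x ≤ y := by
    rcases hxa with h | ⟨l, r, hw, rfl⟩
    · omega
    · exact hyub l r hw
  have h2 : y ≤ x := by
    rcases hya with h | ⟨l, r, hw, rfl⟩
    · omega
    · exact hxub l r hw
  omega

theorem pvMono {t : List Int} (hp : t.Pairwise (· ≤ ·)) (i j : Int)
    (h0 : 0 ≤ i) (hij : i ≤ j) (hj : j < (t.length : Int)) :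
    PySem.List.pyGetD t i 0 ≤ PySem.List.pyGetD t j 0 := by
  rw [PySem.List.pyGetD_eq_getElem t 0 (by omega) (by omega),
      PySem.List.pyGetD_eq_getElem t 0 (by omega) (by omega)]
  rcases eq_or_lt_of_le hij with rfl | hlt
  · exact le_refl _
  · exact (List.pairwise_iff_getElem.mp hp) i.toNat j.toNat (by omega) (by omega) (by omega)

theorem pvAInner_spec (n k : Int) (t : List Int) (l : Int) :
    ∀ (m : Nat) (r : Int), (n - r).toNat ≤ m → 0 ≤ r → r ≤ n →
    r ≤ pvAInner n k t l r ∧ pvAInner n k t l r ≤ n ∧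
    (∀ i, r ≤ i → i < pvAInner n k t l r →
      PySem.List.pyGetD t i 0 - PySem.List.pyGetD t l 0 ≤ k) ∧
    ¬(pvAInner n k t l r < n ∧
      PySem.List.pyGetD t (pvAInner n k t l r) 0 - PySem.List.pyGetD t l 0 ≤ k) := by
  intro m
  induction m with
  | zero =>
    intro r hm h0 hrn
    have hc : ¬(r < n ∧ PySem.List.pyGetD t r 0 - PySem.List.pyGetD t l 0 ≤ k) := by
      intro hc; omega
    have heq : pvAInner n k t l r = r := by rw [pvAInner, dif_neg hc]
    rw [heq]
    exact ⟨le_refl _, hrn, fun i h1 h2 => absurd h2 (by omega), hc⟩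
  | succ m ih =>
    intro r hm h0 hrn
    by_cases hc : r < n ∧ PySem.List.pyGetD t r 0 - PySem.List.pyGetD t l 0 ≤ k
    · have heq : pvAInner n k t l r = pvAInner n k t l (r + 1) := by
        rw [pvAInner, dif_pos hc]
      rw [heq]
      obtain ⟨h1, h2, h3, h4⟩ := ih (r + 1) (by omega) (by omega) (by omega)
      refine ⟨by omega, h2, ?_, h4⟩
      intro i hi1 hi2
      rcases eq_or_lt_of_le hi1 with rfl | hlt
      · exact hc.2
      · exact h3 i (by omega) hi2
    · have heq : pvAInner n k t l r = r := by rw [pvAInner, dif_neg hc]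
      rw [heq]
      exact ⟨le_refl _, hrn, fun i h1 h2 => absurd h2 (by omega), hc⟩

theorem pvAOuter_spec (n k : Int) (t : List Int) (hp : t.Pairwise (· ≤ ·))
    (hn : n ≤ (t.length : Int)) :
    ∀ (m : Nat) (l r days : Int), (n - l).toNat ≤ m → 0 ≤ l → 0 ≤ r → r ≤ n →
    (l < n → ∀ i, 0 ≤ i → i < r →
      PySem.List.pyGetD t i 0 - PySem.List.pyGetD t l 0 ≤ k) →
    0 ≤ days →
    (days = 0 ∨ ∃ l' r', pvWin n k t l' r' ∧ days = r' - l' + 1) →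
    (∀ l' r', pvWin n k t l' r' → l' < l → r' - l' + 1 ≤ days) →
    pvP n k t (pvAOuter n k t l r days) := by
  intro m
  induction m with
  | zero =>
    intro l r days hm h0l h0r hrn hcur hd0 hatt hlb
    have hnl : ¬ l < n := by omega
    have heq : pvAOuter n k t l r days = days := by rw [pvAOuter, dif_neg hnl]
    rw [heq]
    refine ⟨hd0, ?_, hatt⟩
    intro l' r' hw
    exact hlb l' r' hw (by obtain ⟨_, h2, h3, _⟩ := hw; omega)
  | succ m ih =>
    intro l r days hm h0l h0r hrn hcur hd0 hatt hlb
    by_cases hl : l < n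
    · have heq : pvAOuter n k t l r days =
          pvAOuter n k t (l + 1) (pvAInner n k t l r) (max days (pvAInner n k t l r - l)) := by
        rw [pvAOuter, dif_pos hl]
      rw [heq]
      obtain ⟨hrρ, hρn, hmid, hnc⟩ :=
        pvAInner_spec n k t l (n - r).toNat r (le_refl _) h0r hrn
      have Hfull : ∀ i, 0 ≤ i → i < pvAInner n k t l r →
          PySem.List.pyGetD t i 0 - PySem.List.pyGetD t l 0 ≤ k := by
        intro i h1 h2
        rcases Int.lt_or_le i r with h | h
        · exact hcur hl i h1 h
        · exact hmid i h h2
      have harg1 : (n - (l + 1)).toNat ≤ m := by clear hatt hlb hcur ih; omega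
      have harg2 : (0 : Int) ≤ l + 1 := by clear hatt hlb hcur ih; omega
      have harg3 : (0 : Int) ≤ pvAInner n k t l r := by clear hatt hlb hcur ih; omega
      have harg4 : l + 1 < n → ∀ i, 0 ≤ i → i < pvAInner n k t l r →
          PySem.List.pyGetD t i 0 - PySem.List.pyGetD t (l + 1) 0 ≤ k := by
        intro hl1 i h1 h2
        have hstep := pvMono hp l (l + 1) h0l (by omega) (by omega)
        have := Hfull i h1 h2
        omega
      have harg5 : (0 : Int) ≤ max days (pvAInner n k t l r - l) := by clear hatt hlb hcur ih; omega
      apply ih (l + 1) (pvAInner n k t l r) (max days (pvAInner n k t l r - l))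
          harg1 harg2 harg3 hρn harg4 harg5
      · -- attained
        rcases Int.lt_or_le days (pvAInner n k t l r - l) with hlt | hle
        · rw [max_eq_right (by omega)]
          refine Or.inr ⟨l, pvAInner n k t l r - 1,
            ⟨h0l, by omega, by omega, Hfull _ (by omega) (by omega)⟩, by omega⟩
        · rw [max_eq_left hle]; exact hatt
      · -- lower bound for l + 1
        intro l' r' hw hl'
        obtain ⟨hw0, hw1, hw2, hw3⟩ := hw
        rcases Int.lt_or_le l' l with h | h
        · have := hlb l' r' ⟨hw0, hw1, hw2, hw3⟩ h
          have := le_max_left days (pvAInner n k t l r - l)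
          omega
        · have hll : l' = l := by omega
          rw [hll] at hw3
          have hr' : r' < pvAInner n k t l r := by
            by_contra hcon
            push Not at hcon
            have hmono := pvMono hp (pvAInner n k t l r) r' (by omega) hcon (by omega)
            exact hnc ⟨by omega, by omega⟩
          have := le_max_right days (pvAInner n k t l r - l)
          omega
    · have heq : pvAOuter n k t l r days = days := by rw [pvAOuter, dif_neg hl]
      rw [heq]
      refine ⟨hd0, ?_, hatt⟩
      intro l' r' hw
      exact hlb l' r' hw (by obtain ⟨_, h2, h3, _⟩ := hw; omega)

theorem pvBisect_spec (t : List Int) (hp : t.Pairwise (· ≤ ·)) (target : Int) :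
    ∀ (m : Nat) (lo hi : Int), (hi - lo).toNat ≤ m → 0 ≤ lo → lo ≤ hi →
    hi ≤ (t.length : Int) →
    lo ≤ pvBisect t target lo hi ∧ pvBisect t target lo hi ≤ hi ∧
    (∀ i, lo ≤ i → i < pvBisect t target lo hi → PySem.List.pyGetD t i 0 < target) ∧
    (pvBisect t target lo hi < hi → target ≤ PySem.List.pyGetD t (pvBisect t target lo hi) 0) := by
  intro m
  induction m with
  | zero =>
    intro lo hi hm h0 hlh hhl
    have hnl : ¬ lo < hi := by omega
    have heq : pvBisect t target lo hi = lo := by rw [pvBisect, dif_neg hnl]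
    rw [heq]
    exact ⟨le_refl _, hlh, fun i h1 h2 => absurd h2 (by omega), fun h => absurd h (by omega)⟩
  | succ m ih =>
    intro lo hi hm h0 hlh hhl
    by_cases hlt : lo < hi
    · have hmb := pvMidBounds lo hi hlt
      by_cases hcmp : PySem.List.pyGetD t (PySem.Int.floordiv (lo + hi) 2) 0 < target
      · have heq : pvBisect t target lo hi =
            pvBisect t target (PySem.Int.floordiv (lo + hi) 2 + 1) hi := by
          rw [pvBisect, dif_pos hlt, if_pos hcmp]
        rw [heq]
        obtain ⟨h1, h2, h3, h4⟩ := ih (PySem.Int.floordiv (lo + hi) 2 + 1) hi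
          (by omega) (by omega) (by omega) hhl
        refine ⟨by omega, h2, ?_, h4⟩
        intro i hi1 hi2
        rcases Int.lt_or_le i (PySem.Int.floordiv (lo + hi) 2 + 1) with h | h
        · have := pvMono hp i (PySem.Int.floordiv (lo + hi) 2) (by omega) (by omega) (by omega)
          omega
        · exact h3 i h hi2
      · have heq : pvBisect t target lo hi =
            pvBisect t target lo (PySem.Int.floordiv (lo + hi) 2) := by
          rw [pvBisect, dif_pos hlt, if_neg hcmp]
        rw [heq]
        obtain ⟨h1, h2, h3, h4⟩ := ih lo (PySem.Int.floordiv (lo + hi) 2)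
          (by omega) h0 (by omega) (by omega)
        refine ⟨h1, by omega, h3, ?_⟩
        intro _
        rcases Int.lt_or_le (pvBisect t target lo (PySem.Int.floordiv (lo + hi) 2))
            (PySem.Int.floordiv (lo + hi) 2) with h | h
        · exact h4 h
        · have hceq : pvBisect t target lo (PySem.Int.floordiv (lo + hi) 2) =
              PySem.Int.floordiv (lo + hi) 2 := by omega
          rw [hceq]
          omega
    · have heq : pvBisect t target lo hi = lo := by rw [pvBisect, dif_neg hlt]
      rw [heq]
      exact ⟨le_refl _, hlh, fun i h1 h2 => absurd h2 (by omega), fun h => absurd h (by omega)⟩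

theorem pvFoldMax (f : Int → Int) :
    ∀ (L : List Int) (d : Int),
    d ≤ L.foldl (fun a x => max a (f x)) d ∧
    (∀ x ∈ L, f x ≤ L.foldl (fun a x => max a (f x)) d) ∧
    (L.foldl (fun a x => max a (f x)) d = d ∨
      ∃ x ∈ L, L.foldl (fun a x => max a (f x)) d = f x) := by
  intro L
  induction L with
  | nil => intro d; simp
  | cons x xs ih =>
    intro d
    obtain ⟨h1, h2, h3⟩ := ih (max d (f x))
    refine ⟨by simp at h1 ⊢; omega, ?_, ?_⟩
    · intro y hy
      rcases List.mem_cons.mp hy with rfl | hy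
      · simp at h1 ⊢; omega
      · exact h2 y hy
    · rcases h3 with h | ⟨y, hy, h⟩
      · simp only [List.foldl_cons, h]
        rcases max_choice d (f x) with h' | h'
        · exact Or.inl h'
        · exact Or.inr ⟨x, List.mem_cons_self .., h'⟩
      · exact Or.inr ⟨y, List.mem_cons_of_mem _ hy, h⟩

theorem pvA_P (n k : Int) (tasks : List Int)
    (hpre : n ≤ (tasks.length : Int)) :
    pvP n k (PySem.List.sorted tasks id) (min_days_to_complete_tasks n k tasks) := by
  have hp : (PySem.List.sorted tasks id).Pairwise (· ≤ ·) := by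
    simpa using PySem.List.sorted_pairwise tasks id
  have hn : n ≤ ((PySem.List.sorted tasks id).length : Int) := by
    rw [PySem.List.length_sorted]; exact hpre
  unfold min_days_to_complete_tasks
  rcases Int.lt_or_le n 0 with hn0 | hn0
  · have heq : pvAOuter n k (PySem.List.sorted tasks id) 0 0 0 = 0 := by
      rw [pvAOuter, dif_neg (by omega)]
    rw [heq]
    refine ⟨le_refl _, ?_, Or.inl rfl⟩
    intro l r hw
    obtain ⟨h1, h2, h3, _⟩ := hw
    omega
  · apply pvAOuter_spec n k _ hp hn (n - 0).toNat 0 0 0 (le_refl _) (le_refl _) (le_refl _) hn0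
    · intro _ i h1 h2; omega
    · exact le_refl _
    · exact Or.inl rfl
    · intro l' r' hw h
      obtain ⟨w1, _, _, _⟩ := hw
      omega

def pvBF (k : Int) (t : List Int) (r : Int) : Int :=
  r - pvBisect t (PySem.List.pyGetD t r 0 - k) 0 (r + 1) + 1

theorem pvB_P (n k : Int) (tasks : List Int)
    (hpre : n ≤ (tasks.length : Int)) :
    pvP n k (PySem.List.sorted tasks id) (min_days_to_complete_tasks_alt n k tasks) := by
  have hp : (PySem.List.sorted tasks id).Pairwise (· ≤ ·) := by
    simpa using PySem.List.sorted_pairwise tasks id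
  have hn : n ≤ ((PySem.List.sorted tasks id).length : Int) := by
    rw [PySem.List.length_sorted]; exact hpre
  have halt : min_days_to_complete_tasks_alt n k tasks =
      (PySem.List.pyRange 0 n 1).foldl
        (fun a x => max a (pvBF k (PySem.List.sorted tasks id) x)) 0 := rfl
  rw [halt]
  obtain ⟨h1, h2, h3⟩ :=
    pvFoldMax (pvBF k (PySem.List.sorted tasks id)) (PySem.List.pyRange 0 n 1) 0
  refine ⟨h1, ?_, ?_⟩
  · -- upper bound: every window size is ≤ the result
    intro l r hw
    obtain ⟨hl0, hlr, hrn, hcond⟩ := hw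
    have hrmem : r ∈ PySem.List.pyRange 0 n 1 :=
      PySem.List.mem_pyRange_one.mpr ⟨by omega, hrn⟩
    obtain ⟨hb1, hb2, hb3, _⟩ := pvBisect_spec (PySem.List.sorted tasks id) hp
      (PySem.List.pyGetD (PySem.List.sorted tasks id) r 0 - k)
      (r + 1 - 0).toNat 0 (r + 1) (le_refl _) (le_refl _) (by omega) (by omega)
    have hBF : pvBF k (PySem.List.sorted tasks id) r =
        r - pvBisect (PySem.List.sorted tasks id)
          (PySem.List.pyGetD (PySem.List.sorted tasks id) r 0 - k) 0 (r + 1) + 1 := rfl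
    have hcl : pvBisect (PySem.List.sorted tasks id)
        (PySem.List.pyGetD (PySem.List.sorted tasks id) r 0 - k) 0 (r + 1) ≤ l := by
      by_contra hcon
      push Not at hcon
      have := hb3 l hl0 hcon
      omega
    have := h2 r hrmem
    omega
  · -- attained (or zero)
    rcases h3 with h | ⟨r, hrmem, hres⟩
    · exact Or.inl h
    · obtain ⟨hr0, hrn⟩ := PySem.List.mem_pyRange_one.mp hrmem
      obtain ⟨hb1, hb2, _, hb4⟩ := pvBisect_spec (PySem.List.sorted tasks id) hp
        (PySem.List.pyGetD (PySem.List.sorted tasks id) r 0 - k)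
        (r + 1 - 0).toNat 0 (r + 1) (le_refl _) (le_refl _) (by omega) (by omega)
      have hBF : pvBF k (PySem.List.sorted tasks id) r =
          r - pvBisect (PySem.List.sorted tasks id)
            (PySem.List.pyGetD (PySem.List.sorted tasks id) r 0 - k) 0 (r + 1) + 1 := rfl
      rcases Int.lt_or_le r (pvBisect (PySem.List.sorted tasks id)
          (PySem.List.pyGetD (PySem.List.sorted tasks id) r 0 - k) 0 (r + 1)) with hcr | hcr
      · exact Or.inl (by omega)
      · have htg := hb4 (by omega)
        refine Or.inr ⟨pvBisect (PySem.List.sorted tasks id)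
            (PySem.List.pyGetD (PySem.List.sorted tasks id) r 0 - k) 0 (r + 1), r,
          ⟨hb1, hcr, hrn, by omega⟩, by omega⟩

-- ===== VERDICT (by name: the statement is the Claim_ definition above) =====
theorem min_days_to_complete_tasks_spec : Claim_equal_min_days_to_complete_tasks := by
  intro n k tasks _ hpre
  exact pvP_unique (pvA_P n k tasks hpre) (pvB_P n k tasks hpre)
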